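-- pv_equiv track=rewrite | github.com/teilomillet/retrain | retrain/config.py | _ordered_backend_option_keys
-- ===== SOURCE A (Python) =====
-- _LEGACY_PRIME_RL_KEYS: dict[str, str] = {
--     "prime_rl_transport": "transport",
--     "prime_rl_zmq_host": "zmq_host",
--     "prime_rl_zmq_port": "zmq_port",
--     "prime_rl_zmq_hwm": "zmq_hwm",
--     "prime_rl_strict_advantages": "strict_advantages",
--     "prime_rl_sync_wait_s": "sync_wait_s",
--     "prime_rl_sync_poll_s": "sync_poll_s",
-- }
--
-- def _ordered_backend_option_keys(options: dict[str, object]) -> list[str]: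
--     """Stable key order for synthesized [backend.options] blocks."""
--     ordered: list[str] = []
--     seen: set[str] = set()
--     for new_key in _LEGACY_PRIME_RL_KEYS.values():
--         if new_key in options:
--             ordered.append(new_key)
--             seen.add(new_key)
--     for key in sorted(options):
--         if key not in seen:
--             ordered.append(key)
--     return ordered
-- ===== SOURCE B (Python) =====
-- _LEGACY_PRIME_RL_KEYS: dict[str, str] = {
--     "prime_rl_transport": "transport",
--     "prime_rl_zmq_host": "zmq_host",
--     "prime_rl_zmq_port": "zmq_port",
--     "prime_rl_zmq_hwm": "zmq_hwm",
--     "prime_rl_strict_advantages": "strict_advantages",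
--     "prime_rl_sync_wait_s": "sync_wait_s",
--     "prime_rl_sync_poll_s": "sync_poll_s",
-- }
--
-- _RANK: dict[str, int] = {v: i for i, v in enumerate(_LEGACY_PRIME_RL_KEYS.values())}
--
-- def _ordered_backend_option_keys(options: dict[str, object]) -> list[str]:
--     """Stable key order for synthesized [backend.options] blocks."""
--     n = len(_RANK)
--     return sorted(options, key=lambda k: (_RANK.get(k, n), k))
-- ===== Notes on version B (the rewrite author's own statement) =====
-- stated objective: idiomatic
-- what changed: Replaces A's two-phase construction (explicit legacy loop with a 'seen' set, then a filtered scan of the sorted keys) by a single sorted() call whose composite key (rank-table lookup, key) puts legacy keys first in canonical order and the rest alphabetically.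
import Mathlib
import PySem

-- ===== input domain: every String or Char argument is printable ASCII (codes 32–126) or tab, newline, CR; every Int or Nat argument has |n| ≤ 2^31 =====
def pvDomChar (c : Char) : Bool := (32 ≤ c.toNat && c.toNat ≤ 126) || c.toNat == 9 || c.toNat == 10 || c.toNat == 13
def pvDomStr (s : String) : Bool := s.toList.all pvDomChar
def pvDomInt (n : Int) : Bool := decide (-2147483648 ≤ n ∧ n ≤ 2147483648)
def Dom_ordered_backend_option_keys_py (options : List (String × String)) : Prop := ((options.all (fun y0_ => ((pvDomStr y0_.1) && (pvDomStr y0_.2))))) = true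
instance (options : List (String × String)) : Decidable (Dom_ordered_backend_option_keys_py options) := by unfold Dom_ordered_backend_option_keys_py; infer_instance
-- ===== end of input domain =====

-- ===== PORT A =====
-- B orders the keys with one sorted() call on a composite (rank, key) key instead of A's
-- explicit legacy loop plus a 'seen' set (objective: idiomatic; same value everywhere).
-- _LEGACY_PRIME_RL_KEYS.values(), in order
def pvLegacyVals : List String :=
  ["transport", "zmq_host", "zmq_port", "zmq_hwm", "strict_advantages", "sync_wait_s", "sync_poll_s"]

def ordered_backend_option_keys_py (options : List (String × String)) : List String :=
  -- dict(options) has its keys in first-occurrence order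
  let keys := PySem.List.dedup (options.map Prod.fst)
  -- for new_key in _LEGACY_PRIME_RL_KEYS.values(): if new_key in options: ordered.append(new_key); seen.add(new_key)
  let ordered := pvLegacyVals.foldl (fun acc nk => if keys.contains nk then acc ++ [nk] else acc) []
  let seen : PySem.Set String :=
    pvLegacyVals.foldl (fun s nk => if keys.contains nk then PySem.Set.add s nk else s) PySem.Set.empty
  -- for key in sorted(options): if key not in seen: ordered.append(key)
  (PySem.List.sorted keys (fun k => k) false).foldl
    (fun acc k => if PySem.Set.contains seen k then acc else acc ++ [k]) ordered

-- ===== PORT B =====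
-- _RANK = {v: i for i, v in enumerate(_LEGACY_PRIME_RL_KEYS.values())}
def pvRankDict : PySem.Dict String Int :=
  PySem.Dict.ofList (pvLegacyVals.zipIdx.map (fun p => (p.1, (p.2 : Int))))

def ordered_backend_option_keys_py_alt (options : List (String × String)) : List String :=
  -- n = len(_RANK); sorted(options, key=lambda k: (_RANK.get(k, n), k))
  let n : Int := pvRankDict.size
  PySem.List.sorted2 (PySem.List.dedup (options.map Prod.fst))
    (fun k => pvRankDict.getD k n) (fun k => k) false

-- ===== PRECONDITION & SPEC =====
def Spec_ordered_backend_option_keys_py (options : List (String × String)) (out : List String) : Prop := out = ordered_backend_option_keys_py_alt options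
instance (options : List (String × String)) (out : List String) : Decidable (Spec_ordered_backend_option_keys_py options out) := by unfold Spec_ordered_backend_option_keys_py; infer_instance

-- ===== CLAIM (what is proved, stated in full; the proofs are below) =====
def Claim_equal_ordered_backend_option_keys_py : Prop := ∀ (options : List (String × String)), Dom_ordered_backend_option_keys_py options → Spec_ordered_backend_option_keys_py options (ordered_backend_option_keys_py options)

-- ===== LEMMAS AND PROOFS =====

-- sorted2: any rearrangement that is strictly increasing in the lexicographic (k1, k2) key IS the sorted2 result
lemma pv_sorted2_eq_of_perm_of_pairwise {α κ₁ κ₂ : Type} [LinearOrder κ₁] [LinearOrder κ₂]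
    (xs ys : List α) (k1 : α → κ₁) (k2 : α → κ₂) (hp : ys.Perm xs)
    (hpw : ys.Pairwise (fun a b => k1 a < k1 b ∨ (k1 a = k1 b ∧ k2 a < k2 b))) :
    PySem.List.sorted2 xs k1 k2 = ys := by
  have hb : (fun a b => decide (k1 a < k1 b) || (!decide (k1 b < k1 a) && decide (k2 a < k2 b)))
      = (fun a b => decide ((toLex (k1 a, k2 a)) < (toLex (k1 b, k2 b)))) := by
    funext a b
    rw [Bool.eq_iff_iff]
    simp only [Bool.or_eq_true, Bool.and_eq_true, Bool.not_eq_true', decide_eq_true_eq,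
      decide_eq_false_iff_not, Prod.Lex.lt_iff, not_lt]
    constructor
    · rintro (h | ⟨hle, h2⟩)
      · exact Or.inl h
      · rcases lt_or_eq_of_le hle with h1 | h1
        · exact Or.inl h1
        · exact Or.inr ⟨h1, h2⟩
    · rintro (h | ⟨h1, h2⟩)
      · exact Or.inl h
      · exact Or.inr ⟨le_of_eq h1, h2⟩
  have hs : PySem.List.sorted2 xs k1 k2 = PySem.List.sorted xs (fun x => toLex (k1 x, k2 x)) := by
    simp only [PySem.List.sorted2, PySem.List.sorted, Bool.false_eq_true, if_false, hb]
  rw [hs]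
  exact PySem.List.sorted_eq_of_perm_of_pairwise_lt xs ys _ hp
    (hpw.imp (fun h => by rw [Prod.Lex.lt_iff]; exact h))

-- membership in the 'seen' set built by A's first loop
lemma pv_mem_seen_foldl (p : String → Bool) (l : List String) (s : PySem.Set String) (k : String) :
    (k ∈ l.foldl (fun s nk => if p nk then PySem.Set.add s nk else s) s)
      ↔ (k ∈ s ∨ (k ∈ l ∧ p k = true)) := by
  induction l generalizing s with
  | nil => simp
  | cons x t ih =>
    simp only [List.foldl_cons, List.mem_cons]
    by_cases hx : p x
    · rw [if_pos hx, ih, PySem.Set.mem_add]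
      constructor
      · rintro (⟨h | h⟩ | ⟨h1, h2⟩)
        · exact Or.inl h
        · exact Or.inr ⟨Or.inl h, h ▸ hx⟩
        · exact Or.inr ⟨Or.inr h1, h2⟩
      · rintro (h | ⟨(h1 | h1), h2⟩)
        · exact Or.inl (Or.inl h)
        · exact Or.inl (Or.inr h1)
        · exact Or.inr ⟨h1, h2⟩
    · rw [if_neg hx, ih]
      constructor
      · rintro (h | ⟨h1, h2⟩)
        · exact Or.inl h
        · exact Or.inr ⟨Or.inr h1, h2⟩
      · rintro (h | ⟨(h1 | h1), h2⟩)
        · exact Or.inl h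
        · exact absurd (h1 ▸ h2) hx
        · exact Or.inr ⟨h1, h2⟩

-- the rank of a key outside the legacy table is the default 7 = len(_RANK)
lemma pv_rank_of_not_mem (k : String) (h : k ∉ pvLegacyVals) :
    pvRankDict.getD k (pvRankDict.size : Int) = 7 := by
  simp only [pvLegacyVals, List.mem_cons, not_or] at h
  obtain ⟨h1, h2, h3, h4, h5, h6, h7, -⟩ := h
  have hit : pvRankDict.items = [("transport",(0:Int)), ("zmq_host",1), ("zmq_port",2), ("zmq_hwm",3),
      ("strict_advantages",4), ("sync_wait_s",5), ("sync_poll_s",6)] := by decide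
  have hsz : (pvRankDict.size : Int) = 7 := by decide
  have b : ∀ v : String, ¬ k = v → (v == k) = false := fun v hv => beq_eq_false_iff_ne.mpr (fun e => hv e.symm)
  rw [hsz, PySem.Dict.getD, PySem.Dict.get?, hit]
  simp [List.find?, b _ h1, b _ h2, b _ h3, b _ h4, b _ h5, b _ h6, b _ h7]

-- the rank of a legacy key is its table index, below 7
lemma pv_rank_of_mem (k : String) (h : k ∈ pvLegacyVals) :
    pvRankDict.getD k (pvRankDict.size : Int) < 7 := by
  fin_cases h <;> decide

-- the legacy keys carry strictly increasing ranks, in table order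
lemma pv_rank_pairwise :
    pvLegacyVals.Pairwise
      (fun a b => pvRankDict.getD a (pvRankDict.size : Int) < pvRankDict.getD b (pvRankDict.size : Int)) := by
  decide

-- the two port bodies agree on any duplicate-free key list
lemma pv_ports_agree (keys : List String) (hnd : keys.Nodup) :
    (PySem.List.sorted keys (fun k => k) false).foldl
      (fun acc k =>
        if PySem.Set.contains
          (pvLegacyVals.foldl (fun s nk => if keys.contains nk then PySem.Set.add s nk else s) PySem.Set.empty) k
        then acc else acc ++ [k])
      (pvLegacyVals.foldl (fun acc nk => if keys.contains nk then acc ++ [nk] else acc) [])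
    = PySem.List.sorted2 keys (fun k => pvRankDict.getD k (pvRankDict.size : Int)) (fun k => k) false := by
  have hseen : ∀ k ∈ keys,
      PySem.Set.contains
        (pvLegacyVals.foldl (fun s nk => if keys.contains nk then PySem.Set.add s nk else s) PySem.Set.empty) k
      = pvLegacyVals.contains k := by
    intro k hk
    rw [Bool.eq_iff_iff]
    rw [PySem.Set.contains, List.contains_eq_mem, decide_eq_true_eq, pv_mem_seen_foldl,
      List.contains_eq_mem, decide_eq_true_eq]
    simp only [PySem.Set.empty, List.not_mem_nil, false_or, List.contains_eq_mem, decide_eq_true_eq]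
    exact ⟨fun h => h.1, fun h => ⟨h, hk⟩⟩
  -- A's loops produce: legacy keys present, in table order, then the remaining keys, sorted
  have h1 : pvLegacyVals.foldl (fun acc nk => if keys.contains nk then acc ++ [nk] else acc) []
      = pvLegacyVals.filter (fun v => keys.contains v) := by
    have := PySem.List.foldl_append_if (fun v => keys.contains v) (fun v => v) pvLegacyVals []
    simpa using this
  have h2 : ∀ (acc : List String) (l : List String), (∀ k ∈ l, k ∈ keys) →
      l.foldl (fun acc k =>
        if PySem.Set.contains
          (pvLegacyVals.foldl (fun s nk => if keys.contains nk then PySem.Set.add s nk else s) PySem.Set.empty) k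
        then acc else acc ++ [k]) acc
      = acc ++ l.filter (fun k => !pvLegacyVals.contains k) := by
    intro acc l hl
    induction l generalizing acc with
    | nil => simp
    | cons x t ih =>
      have hx := hseen x (hl x (List.mem_cons_self))
      by_cases hm : pvLegacyVals.contains x
      · simp only [List.foldl_cons, List.filter_cons, hx, hm, Bool.not_true, if_true,
          Bool.false_eq_true, if_false]
        exact ih acc (fun k hk => hl k (List.mem_cons_of_mem _ hk))
      · rw [Bool.not_eq_true] at hm
        simp only [List.foldl_cons, List.filter_cons, hx, hm, Bool.not_false, if_true,
          Bool.false_eq_true, if_false]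
        rw [ih (acc ++ [x]) (fun k hk => hl k (List.mem_cons_of_mem _ hk))]
        simp
  rw [h1, h2 _ _ (fun k hk => (PySem.List.mem_sorted keys _ false k).mp hk)]
  refine (pv_sorted2_eq_of_perm_of_pairwise keys _ _ (fun k => k) ?_ ?_).symm
  · -- that rearrangement is a permutation of the keys
    have hL : (pvLegacyVals.filter (fun v => keys.contains v)).Perm
        (keys.filter (fun v => pvLegacyVals.contains v)) := by
      rw [List.perm_ext_iff_of_nodup (List.Nodup.filter _ (by decide)) (List.Nodup.filter _ hnd)]
      intro a
      simp only [List.mem_filter, List.contains_eq_mem, decide_eq_true_eq]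
      exact ⟨fun h => ⟨h.2, h.1⟩, fun h => ⟨h.2, h.1⟩⟩
    have hR : ((PySem.List.sorted keys (fun k => k) false).filter (fun k => !pvLegacyVals.contains k)).Perm
        (keys.filter (fun k => !pvLegacyVals.contains k)) :=
      (PySem.List.sorted_perm keys _ false).filter _
    exact (hL.append hR).trans (List.filter_append_perm _ keys)
  · -- and it is strictly increasing in the (rank, key) order
    rw [List.pairwise_append]
    refine ⟨?_, ?_, ?_⟩
    · exact (pv_rank_pairwise.sublist (List.filter_sublist)).imp (fun h => Or.inl h)
    · have hstrict : (PySem.List.sorted keys (fun k => k) false).Pairwise (· < ·) := by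
        have hle := PySem.List.sorted_pairwise keys (fun k => k)
        have hne : (PySem.List.sorted keys (fun k => k) false).Nodup :=
          (PySem.List.sorted_perm keys _ false).symm.nodup hnd
        exact (hle.and hne).imp (fun h => lt_of_le_of_ne h.1 h.2)
      refine List.Pairwise.imp_of_mem ?_ (hstrict.sublist (List.filter_sublist))
      intro a b ha hb hab
      have ha7 : pvRankDict.getD a (pvRankDict.size : Int) = 7 := pv_rank_of_not_mem a (by
        have := (List.mem_filter.mp ha).2; simpa using this)
      have hb7 : pvRankDict.getD b (pvRankDict.size : Int) = 7 := pv_rank_of_not_mem b (by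
        have := (List.mem_filter.mp hb).2; simpa using this)
      exact Or.inr ⟨by rw [ha7, hb7], hab⟩
    · intro a ha b hb
      have ha6 : pvRankDict.getD a (pvRankDict.size : Int) < 7 :=
        pv_rank_of_mem a (List.mem_of_mem_filter ha)
      have hb7 : pvRankDict.getD b (pvRankDict.size : Int) = 7 := pv_rank_of_not_mem b (by
        have := (List.mem_filter.mp hb).2; simpa using this)
      exact Or.inl (by rw [hb7]; exact ha6)

-- ===== VERDICT (by name: the statement is the Claim_ definition above) =====
theorem ordered_backend_option_keys_py_spec : Claim_equal_ordered_backend_option_keys_py := by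
  intro options _
  unfold Spec_ordered_backend_option_keys_py ordered_backend_option_keys_py ordered_backend_option_keys_py_alt
  exact pv_ports_agree (PySem.List.dedup (options.map Prod.fst))
    (by rw [PySem.List.dedup_eq_ofList]; exact PySem.Set.nodup_ofList _)
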